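-- pv_equiv track=rewrite | github.com/ekm507/araste | araste/filters.py | grow_horizontal
-- ===== SOURCE A (Python) =====
-- def grow_horizontal(art: str) -> str:
--     grow_ratio = 2
--
--     art_lines = art.split('\n')
--
--     output = ''
--
--     for line in art_lines:
--         for character in line:
--             output += character * grow_ratio
--         output += '\n'
--
--     return output[:-1]
-- ===== SOURCE B (Python) =====
-- def grow_horizontal(art: str) -> str:
--     grow_ratio = 2
--     return ''.join(c if c == '\n' else c * grow_ratio for c in art)
-- ===== Notes on version B (the rewrite author's own statement) =====
-- stated objective: simpler
-- what changed: Replaced the split-into-lines nested loops with trailing-newline trim by a single flat pass over the string that doubles every character except newlines.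
import Mathlib
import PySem

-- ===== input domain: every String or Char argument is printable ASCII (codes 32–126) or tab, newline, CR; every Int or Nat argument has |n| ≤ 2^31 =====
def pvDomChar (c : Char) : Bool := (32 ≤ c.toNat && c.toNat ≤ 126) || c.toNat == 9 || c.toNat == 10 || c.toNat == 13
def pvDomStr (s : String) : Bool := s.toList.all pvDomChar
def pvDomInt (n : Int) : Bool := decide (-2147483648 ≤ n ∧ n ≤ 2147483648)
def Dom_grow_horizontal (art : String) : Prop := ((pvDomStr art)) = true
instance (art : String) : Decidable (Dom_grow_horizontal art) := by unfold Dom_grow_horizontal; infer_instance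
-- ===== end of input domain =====

-- B replaces A's split-into-lines nested loops (plus trailing trim) by one flat pass doubling every non-newline character; objective: simpler.


-- ===== PORT A =====
def grow_horizontal (art : String) : String :=
  let growRatio : Nat := 2
  let artLines : List (List Char) := PySem.Chars.splitOn art.toList ['\n']
  let output : List Char := artLines.foldl
    (fun out line => (line.foldl (fun o c => o ++ List.replicate growRatio c) out) ++ ['\n']) []
  String.ofList (PySem.List.slice output none (some (-1)))

-- ===== PORT B =====
def grow_horizontal_alt (art : String) : String :=
  String.ofList (art.toList.flatMap (fun c => if c = '\n' then [c] else [c, c]))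

-- ===== PRECONDITION & SPEC =====
def Spec_grow_horizontal (art : String) (out : String) : Prop := out = grow_horizontal_alt art
instance (art : String) (out : String) : Decidable (Spec_grow_horizontal art out) := by unfold Spec_grow_horizontal; infer_instance

-- ===== CLAIM (what is proved, stated in full; the proofs are below) =====
def Claim_equal_grow_horizontal : Prop := ∀ (art : String), Dom_grow_horizontal art → Spec_grow_horizontal art (grow_horizontal art)

-- ===== LEMMAS AND PROOFS =====

-- the lines of cs split at '\n', accumulating the current line's prefix
def pvSplit1 (pre : List Char) : List Char → List (List Char)
  | [] => [pre]
  | c :: rest => if c = '\n' then pre :: pvSplit1 [] rest else pvSplit1 (pre ++ [c]) rest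

theorem pvSplit1_nl (pre rest : List Char) :
    pvSplit1 pre ('\n' :: rest) = pre :: pvSplit1 [] rest := by simp [pvSplit1]

theorem pvSplit1_ch (pre rest : List Char) (c : Char) (hc : c ≠ '\n') :
    pvSplit1 pre (c :: rest) = pvSplit1 (pre ++ [c]) rest := by simp [pvSplit1, hc]

theorem pv_go_spec (fuel : Nat) : ∀ (l cur : List Char) (acc : List (List Char)),
    l.length < fuel →
    PySem.Chars.splitOn.go ['\n'] fuel l cur acc = acc.reverse ++ pvSplit1 cur.reverse l := by
  induction fuel with
  | zero => intro l cur acc h; omega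
  | succ n ih =>
    intro l cur acc h
    cases l with
    | nil => simp [PySem.Chars.splitOn.go, pvSplit1]
    | cons c rest =>
      by_cases hc : c = '\n'
      · subst hc
        rw [show PySem.Chars.splitOn.go ['\n'] (n+1) ('\n' :: rest) cur acc
              = PySem.Chars.splitOn.go ['\n'] n rest [] (cur.reverse :: acc) by
            simp [PySem.Chars.splitOn.go, List.isPrefixOf]]
        rw [ih rest [] (cur.reverse :: acc) (by simpa using Nat.lt_of_succ_lt_succ h)]
        simp [pvSplit1_nl]
      · rw [show PySem.Chars.splitOn.go ['\n'] (n+1) (c :: rest) cur acc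
              = PySem.Chars.splitOn.go ['\n'] n rest (c :: cur) acc by
            simp only [PySem.Chars.splitOn.go, List.isPrefixOf]
            rw [if_neg (by simp [Ne.symm hc])]]
        rw [ih rest (c :: cur) acc (by simpa using Nat.lt_of_succ_lt_succ h)]
        rw [pvSplit1_ch _ _ _ hc]
        simp

theorem pv_splitOn_eq (cs : List Char) : PySem.Chars.splitOn cs ['\n'] = pvSplit1 [] cs := by
  rw [PySem.Chars.splitOn, pv_go_spec (cs.length + 1) cs [] [] (Nat.lt_succ_self _)]
  simp

-- A's outer loop over the lines of pvSplit1, flattened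
theorem pv_fold_split1 (cs : List Char) : ∀ (pre out : List Char),
    (pvSplit1 pre cs).foldl
      (fun out line => (line.foldl (fun o c => o ++ List.replicate 2 c) out) ++ ['\n']) out
    = out ++ pre.flatMap (fun c => List.replicate 2 c)
        ++ cs.flatMap (fun c => if c = '\n' then [c] else [c, c]) ++ ['\n'] := by
  induction cs with
  | nil =>
    intro pre out
    simp [pvSplit1, List.flatMap_def]
  | cons c rest ih =>
    intro pre out
    by_cases hc : c = '\n'
    · subst hc
      rw [pvSplit1_nl, List.foldl_cons,
        ih [] ((pre.foldl (fun o c => o ++ List.replicate 2 c) out) ++ ['\n'])]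
      simp [List.flatMap_def]
    · rw [pvSplit1_ch _ _ _ hc, ih (pre ++ [c])]
      simp [hc, List.replicate]

theorem pv_main (cs : List Char) :
    PySem.List.slice
      ((PySem.Chars.splitOn cs ['\n']).foldl
        (fun out line => (line.foldl (fun o c => o ++ List.replicate 2 c) out) ++ ['\n']) [])
      none (some (-1))
    = cs.flatMap (fun c => if c = '\n' then [c] else [c, c]) := by
  rw [pv_splitOn_eq, pv_fold_split1, PySem.List.slice_to_neg_one]
  simp

-- ===== VERDICT (by name: the statement is the Claim_ definition above) =====
theorem grow_horizontal_spec : Claim_equal_grow_horizontal := by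
  intro art _
  unfold Spec_grow_horizontal
  have hA : grow_horizontal art
      = String.ofList (PySem.List.slice
          ((PySem.Chars.splitOn art.toList ['\n']).foldl
            (fun out line => (line.foldl (fun o c => o ++ List.replicate 2 c) out) ++ ['\n']) [])
          none (some (-1))) := rfl
  rw [hA, pv_main]
  rfl
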